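-- pv_equiv track=rewrite | github.com/Jarred-ZA/WhatsappDaily | intelligence-core/src/memory/updater.py | _append_to_section
-- ===== SOURCE A (Python) =====
-- def _append_to_section(text: str, section: str, new_content: str) -> str:
--     """Append content to the end of a section."""
--     lines = text.split("\n")
--     result = []
--     in_target = False
--     appended = False
--
--     for i, line in enumerate(lines):
--         if line.strip() == f"## {section}":
--             in_target = True
--
--         if in_target and not appended:
--             next_is_new_section = (
--                 i + 1 < len(lines) and lines[i + 1].startswith("## ")
--             ) or i == len(lines) - 1
--
--             if next_is_new_section:
--                 result.append(line)
--                 result.append(new_content)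
--                 in_target = False
--                 appended = True
--                 continue
--
--         result.append(line)
--
--     if in_target and not appended:
--         result.append(new_content)
--
--     return "\n".join(result)
-- ===== SOURCE B (Python) =====
-- def _append_to_section(text: str, section: str, new_content: str) -> str:
--     """Append content to the end of a section (splice at a computed index)."""
--     lines = text.split("\n")
--     header = "## " + section
--     h = next((i for i, l in enumerate(lines) if l.strip() == header), None)
--     if h is not None:
--         j = next((i for i in range(h + 1, len(lines)) if lines[i].startswith("## ")),
--                  len(lines))
--         lines = lines[:j] + [new_content] + lines[j:]
--     return "\n".join(lines)
-- ===== Notes on version B (the rewrite author's own statement) =====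
-- stated objective: simpler
-- what changed: Replaces A's single streaming pass with in_target/appended flags and i+1 lookahead by two explicit index searches (first line stripping to '## <section>', then the next '## '-prefixed line, defaulting to len(lines)) followed by a list splice before joining.
import Mathlib
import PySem

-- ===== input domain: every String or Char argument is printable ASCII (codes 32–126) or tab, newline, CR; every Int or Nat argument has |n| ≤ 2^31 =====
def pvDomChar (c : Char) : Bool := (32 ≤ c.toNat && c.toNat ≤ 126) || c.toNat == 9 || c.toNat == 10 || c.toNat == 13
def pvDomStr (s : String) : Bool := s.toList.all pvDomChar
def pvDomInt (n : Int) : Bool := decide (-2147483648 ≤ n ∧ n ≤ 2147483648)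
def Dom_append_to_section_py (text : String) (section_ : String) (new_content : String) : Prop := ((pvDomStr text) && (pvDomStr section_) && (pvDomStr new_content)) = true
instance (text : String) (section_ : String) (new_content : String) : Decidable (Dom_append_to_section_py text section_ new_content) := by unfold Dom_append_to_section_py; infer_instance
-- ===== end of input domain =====

-- B replaces A's single streaming pass with in_target/appended flags and i+1 lookahead by
-- two index searches (first '## <section>' line, then the next '## ' header) and a list
-- splice; objective: simpler (same O(n) cost, no speed claim).

-- "## " as a list of chars (used by both ports)
def pvH3 : List Char := ['#', '#', ' ']

-- ===== PORT A =====
-- A's for-loop over enumerate(lines) as structural recursion on the remaining lines with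
-- state (result, in_target, appended); the Python lookahead
-- '(i+1 < len(lines) and lines[i+1].startswith("## ")) or i == len(lines)-1'
-- is read off rest = lines[i+1:] (rest nonempty ↔ i+1 < len, rest empty ↔ i = len-1): exact.
def pvLoopA (header nc : List Char) :
    List (List Char) → List (List Char) → Bool → Bool → (List (List Char) × Bool × Bool)
  | [], result, in_target, appended => (result, in_target, appended)
  | line :: rest, result, in_target, appended =>
    let it := if PySem.Chars.strip line = header then true else in_target
    if it && !appended then
      let next_is_new_section :=
        match rest with
        | next :: _ => PySem.Chars.startswith next pvH3
        | [] => true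
      if next_is_new_section then
        pvLoopA header nc rest (result ++ [line, nc]) false true
      else
        pvLoopA header nc rest (result ++ [line]) it appended
    else
      pvLoopA header nc rest (result ++ [line]) it appended

def append_to_section_py (text : String) (section_ : String) (new_content : String) : String :=
  let lines := PySem.Chars.splitOn text.toList ['\n']
  let r := pvLoopA ("## ".toList ++ section_.toList) new_content.toList lines [] false false
  let result := if r.2.1 && !r.2.2 then r.1 ++ [new_content.toList] else r.1
  String.ofList (PySem.Chars.join ['\n'] result)

-- ===== PORT B =====
def append_to_section_py_alt (text : String) (section_ : String) (new_content : String) : String :=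
  let lines := PySem.Chars.splitOn text.toList ['\n']
  let header := "## ".toList ++ section_.toList
  let lines2 :=
    match lines.findIdx? (fun l => decide (PySem.Chars.strip l = header)) with
    | none => lines
    | some h =>
      let j :=
        match (lines.drop (h + 1)).findIdx? (fun l => PySem.Chars.startswith l pvH3) with
        | some k => h + 1 + k
        | none => lines.length
      lines.take j ++ new_content.toList :: lines.drop j
  String.ofList (PySem.Chars.join ['\n'] lines2)


-- ===== PRECONDITION & SPEC =====
def Spec_append_to_section_py (text : String) (section_ : String) (new_content : String) (out : String) : Prop := out = append_to_section_py_alt text section_ new_content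
instance (text : String) (section_ : String) (new_content : String) (out : String) : Decidable (Spec_append_to_section_py text section_ new_content out) := by unfold Spec_append_to_section_py; infer_instance

-- ===== CLAIM (what is proved, stated in full; the proofs are below) =====
def Claim_equal_append_to_section_py : Prop := ∀ (text : String) (section_ : String) (new_content : String), Dom_append_to_section_py text section_ new_content → Spec_append_to_section_py text section_ new_content (append_to_section_py text section_ new_content)

-- ===== LEMMAS AND PROOFS =====

-- What A's loop inserts once in_target is set: new_content goes right before the next
-- '## '-prefixed line, or at the very end if there is none.
def pvIns (nc : List Char) : List (List Char) → List (List Char)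
  | [] => [nc]
  | l :: rest =>
    match rest with
    | [] => [l, nc]
    | next :: _ =>
      if PySem.Chars.startswith next pvH3 then l :: nc :: rest else l :: pvIns nc rest

lemma pvLoopA_copy (header nc : List Char) (tl : List (List Char)) :
    ∀ (pre : List (List Char)) (res : List (List Char)) (ap : Bool),
      (∀ l ∈ pre, ¬ PySem.Chars.strip l = header) →
      pvLoopA header nc (pre ++ tl) res false ap = pvLoopA header nc tl (res ++ pre) false ap := by
  intro pre
  induction pre with
  | nil => intro res ap _; simp
  | cons l pre' ih =>
    intro res ap hno
    have hl : ¬ PySem.Chars.strip l = header := hno l (by simp)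
    rw [List.cons_append]; simp only [pvLoopA]
    simp only [if_neg hl, Bool.false_and, Bool.false_eq_true, if_false]
    rw [ih (res ++ [l]) ap (fun x hx => hno x (by simp [hx]))]
    simp

lemma pvLoopA_done (header nc : List Char) :
    ∀ (ls res : List (List Char)) (it : Bool),
      (pvLoopA header nc ls res it true).1 = res ++ ls ∧
      (pvLoopA header nc ls res it true).2.2 = true := by
  intro ls
  induction ls with
  | nil => intro res it; simp [pvLoopA]
  | cons l rest ih =>
    intro res it
    obtain ⟨h1, h2⟩ := ih (res ++ [l]) (if PySem.Chars.strip l = header then true else it)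
    simp only [pvLoopA]
    simp only [Bool.not_true, Bool.and_false, Bool.false_eq_true, if_false]
    exact ⟨by rw [h1]; simp, h2⟩

lemma pvLoopA_ins (header nc : List Char) :
    ∀ (ls res : List (List Char)),
      (if (pvLoopA header nc ls res true false).2.1 && !(pvLoopA header nc ls res true false).2.2
       then (pvLoopA header nc ls res true false).1 ++ [nc]
       else (pvLoopA header nc ls res true false).1) = res ++ pvIns nc ls := by
  intro ls
  induction ls with
  | nil => intro res; simp [pvLoopA, pvIns]
  | cons l rest ih =>
    intro res
    simp only [pvLoopA]
    simp only [ite_self, Bool.not_false, Bool.and_true, if_true]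
    cases rest with
    | nil => simp [pvLoopA, pvIns]
    | cons nxt rs =>
      by_cases hs : PySem.Chars.startswith nxt pvH3 = true
      · simp only [hs, if_true]
        obtain ⟨h1, h2⟩ := pvLoopA_done header nc (nxt :: rs) (res ++ [l, nc]) false
        rw [h2, h1]
        simp [pvIns, hs]
      · simp only [hs, Bool.false_eq_true, if_false]
        rw [ih (res ++ [l])]
        simp [pvIns, hs]

lemma pvLoopA_enter (header nc line : List Char) (rest res : List (List Char))
    (h : PySem.Chars.strip line = header) :
    pvLoopA header nc (line :: rest) res false false =
    pvLoopA header nc (line :: rest) res true false := by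
  simp only [pvLoopA]
  simp [h]

lemma pvIns_eq (nc l : List Char) (rest : List (List Char)) :
    pvIns nc (l :: rest) =
      match rest.findIdx? (fun x => PySem.Chars.startswith x pvH3) with
      | some k => l :: (rest.take k ++ nc :: rest.drop k)
      | none => l :: (rest ++ [nc]) := by
  induction rest generalizing l with
  | nil => simp [pvIns]
  | cons r rs ih =>
    by_cases hr : PySem.Chars.startswith r pvH3 = true
    · simp [pvIns, hr, List.findIdx?_cons]
    · rw [pvIns]
      simp only [hr, Bool.false_eq_true, if_false, List.findIdx?_cons]
      rw [ih r]
      cases hk : rs.findIdx? (fun x => PySem.Chars.startswith x pvH3) with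
      | none => simp
      | some k => simp

-- ===== VERDICT (by name: the statement is the Claim_ definition above) =====
theorem append_to_section_py_spec : Claim_equal_append_to_section_py := by
  intro text section_ new_content _dom
  unfold Spec_append_to_section_py append_to_section_py append_to_section_py_alt
  dsimp only
  set lines := PySem.Chars.splitOn text.toList ['\n'] with hlines
  set header := "## ".toList ++ section_.toList with hheader
  set nc := new_content.toList with hnc
  cases hf : lines.findIdx? (fun l => decide (PySem.Chars.strip l = header)) with
  | none =>
    have hno : ∀ l ∈ lines, ¬ PySem.Chars.strip l = header := by
      intro l hl
      simpa using (List.findIdx?_eq_none_iff.mp hf) l hl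
    have hcopy := pvLoopA_copy header nc [] lines [] false hno
    simp only [List.append_nil, List.nil_append] at hcopy
    rw [hcopy]
    simp [pvLoopA]
  | some h =>
    dsimp only
    obtain ⟨hlt, hp, hprev⟩ := List.findIdx?_eq_some_iff_getElem.mp hf
    have hp' : PySem.Chars.strip lines[h] = header := by simpa using hp
    set pre := lines.take h with hpre
    set post := lines.drop (h + 1) with hpost
    have hprelen : pre.length = h := by
      simp [hpre, List.length_take]; omega
    have hdecomp : lines = pre ++ lines[h] :: post := by
      rw [hpre, hpost, List.getElem_cons_drop, List.take_append_drop]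
    have hnopre : ∀ l ∈ pre, ¬ PySem.Chars.strip l = header := by
      intro l hl
      obtain ⟨j, hj, rfl⟩ := List.getElem_of_mem hl
      have hjh : j < h := hprelen ▸ hj
      have hne := hprev j hjh
      have hEq : pre[j] = lines[j]'(by omega) := by simp [hpre]
      rw [hEq]; simpa using hne
    have hA : (if (pvLoopA header nc lines [] false false).2.1 &&
                  !(pvLoopA header nc lines [] false false).2.2
               then (pvLoopA header nc lines [] false false).1 ++ [nc]
               else (pvLoopA header nc lines [] false false).1)
            = pre ++ pvIns nc (lines[h] :: post) := by
      conv_lhs => rw [hdecomp]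
      rw [pvLoopA_copy header nc _ pre [] false hnopre, List.nil_append,
        pvLoopA_enter header nc _ _ _ hp', pvLoopA_ins]
    rw [hA]
    cases hk : post.findIdx? (fun l => PySem.Chars.startswith l pvH3) with
    | none =>
      rw [pvIns_eq, hk]
      dsimp only
      have hstep : pre ++ lines[h] :: (post ++ [nc]) = (pre ++ lines[h] :: post) ++ [nc] := by simp
      rw [hstep, ← hdecomp, List.take_length, List.drop_length]

    | some k =>
      have hklt : k < post.length := (List.findIdx?_eq_some_iff_getElem.mp hk).1
      rw [pvIns_eq, hk]
      dsimp only
      have htake : lines.take (h + 1 + k) = pre ++ lines[h] :: post.take k := by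
        conv_lhs => rw [hdecomp]
        rw [List.take_append, hprelen, List.take_of_length_le (le_of_lt (by omega))]
        congr 1
        rw [show h + 1 + k - h = k + 1 by omega]
        simp
      have hdrop : lines.drop (h + 1 + k) = post.drop k := by
        conv_lhs => rw [hdecomp]
        rw [List.drop_append, hprelen, List.drop_of_length_le (le_of_lt (by omega))]
        rw [show h + 1 + k - h = k + 1 by omega]
        simp
      rw [htake, hdrop]
      simp
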